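-- pv_equiv track=rewrite | github.com/markkram-boot/LineLM | utils.py | convert_prediction_to_multilinestring
-- ===== SOURCE A (Python) =====
-- def convert_prediction_to_multilinestring(coord_list, max_id=500):
--     """
--     Convert a list of coordinates into a MultiLineString, handling specific rules:
--     - Remove coordinates (1501, 1501), (1502, 1502), and (1503, 1503).
--     - Start a new LineString whenever encountering (1504, 1504).
--
--     Parameters:
--     - coord_list: List of coordinate tuples.
--
--     Returns:
--     - MultiLineString object.
--     """
--     lines = []
--     segment = []
--
--     for coord in coord_list:
--         # Skip specific coordinates
--         if coord in [(max_id+1, max_id+1), (max_id+2, max_id+2), (max_id+3, max_id+3)]: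
--             continue
--
--         # Start a new LineString when encountering (1504, 1504)
--         if coord == (max_id+4, max_id+4):
--             if len(segment) > 1:  # Add the current segment if it has enough points
--                 lines.append(segment)
--             segment = []  # Start a new segment
--             continue
--
--         # Add the current coordinate to the segment
--         segment.append(coord)
--
--     # Add the last segment to the lines
--     if len(segment) > 1:
--         lines.append(segment)
--
--     return lines
-- ===== SOURCE B (Python) =====
-- def convert_prediction_to_multilinestring(coord_list, max_id=500):
--     delim = (max_id + 4, max_id + 4)
--     skips = ((max_id + 1, max_id + 1), (max_id + 2, max_id + 2), (max_id + 3, max_id + 3))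
--     # pass 1: drop the skip markers; pass 2: split on the delimiter, keeping runs of >1 points
--     cleaned = [c for c in coord_list if c not in skips]
--     lines = []
--     i, n = 0, len(cleaned)
--     while i < n:
--         if cleaned[i] == delim:
--             i += 1
--             continue
--         j = i + 1
--         while j < n and cleaned[j] != delim:
--             j += 1
--         if j - i > 1:
--             lines.append(cleaned[i:j])
--         i = j
--     return lines
-- ===== Notes on version B (the rewrite author's own statement) =====
-- stated objective: alternative
-- what changed: A's single interleaved loop carrying (lines, segment) state is replaced by two passes: filter out the three skip markers, then split the cleaned list on the delimiter into maximal runs, keeping runs longer than one point.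
import Mathlib
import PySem

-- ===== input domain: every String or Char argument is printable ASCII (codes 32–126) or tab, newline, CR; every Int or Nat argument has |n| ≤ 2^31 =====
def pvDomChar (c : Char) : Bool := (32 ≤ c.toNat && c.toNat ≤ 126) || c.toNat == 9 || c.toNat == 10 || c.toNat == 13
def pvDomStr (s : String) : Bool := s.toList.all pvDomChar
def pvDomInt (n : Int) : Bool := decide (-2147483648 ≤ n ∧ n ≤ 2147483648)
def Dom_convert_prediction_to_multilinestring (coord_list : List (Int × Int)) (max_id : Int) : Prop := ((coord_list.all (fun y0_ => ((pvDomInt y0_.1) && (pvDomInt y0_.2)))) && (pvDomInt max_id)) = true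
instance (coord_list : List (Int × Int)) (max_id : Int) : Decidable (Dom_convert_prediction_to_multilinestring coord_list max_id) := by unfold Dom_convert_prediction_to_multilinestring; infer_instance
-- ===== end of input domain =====

-- B re-implements A as two passes (filter the skip markers, then split on the delimiter); objective: alternative decomposition, same O(n) cost.

-- ===== PORT A =====
-- A's loop body: skip markers, delimiter flushes the segment (kept if len > 1), else append.
def pvStepA (max_id : Int) (st : List (List (Int × Int)) × List (Int × Int)) (coord : Int × Int) :
    List (List (Int × Int)) × List (Int × Int) :=
  if coord = (max_id+1, max_id+1) ∨ coord = (max_id+2, max_id+2) ∨ coord = (max_id+3, max_id+3) then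
    st
  else if coord = (max_id+4, max_id+4) then
    ((if st.2.length > 1 then st.1 ++ [st.2] else st.1), [])
  else
    (st.1, st.2 ++ [coord])

def convert_prediction_to_multilinestring (coord_list : List (Int × Int)) (max_id : Int) : List (List (Int × Int)) :=
  let st := coord_list.foldl (pvStepA max_id) ([], [])
  if st.2.length > 1 then st.1 ++ [st.2] else st.1

-- ===== PORT B =====
-- B's second pass: skip leading delimiters, scan a maximal delimiter-free run (the inner while / slice), keep it if len > 1.
def pvSplitRuns (delim : Int × Int) : List (Int × Int) → List (List (Int × Int))
  | [] => []
  | x :: xs =>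
    if x = delim then pvSplitRuns delim xs
    else
      let run := x :: xs.takeWhile (fun c => c ≠ delim)
      let rest := xs.dropWhile (fun c => c ≠ delim)
      (if run.length > 1 then [run] else []) ++ pvSplitRuns delim rest
termination_by l => l.length
decreasing_by
  · simp
  · have := List.length_dropWhile_le (fun c => decide (c ≠ delim)) xs
    simp only [List.length_cons]; omega

def convert_prediction_to_multilinestring_alt (coord_list : List (Int × Int)) (max_id : Int) : List (List (Int × Int)) :=
  let cleaned := coord_list.filter
    (fun c => ¬(c = (max_id+1, max_id+1) ∨ c = (max_id+2, max_id+2) ∨ c = (max_id+3, max_id+3)))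
  pvSplitRuns (max_id+4, max_id+4) cleaned

-- ===== PRECONDITION & SPEC =====
def Spec_convert_prediction_to_multilinestring (coord_list : List (Int × Int)) (max_id : Int) (out : List (List (Int × Int))) : Prop := out = convert_prediction_to_multilinestring_alt coord_list max_id
instance (coord_list : List (Int × Int)) (max_id : Int) (out : List (List (Int × Int))) : Decidable (Spec_convert_prediction_to_multilinestring coord_list max_id out) := by unfold Spec_convert_prediction_to_multilinestring; infer_instance

-- ===== CLAIM (what is proved, stated in full; the proofs are below) =====
def Claim_equal_convert_prediction_to_multilinestring : Prop := ∀ (coord_list : List (Int × Int)) (max_id : Int), Dom_convert_prediction_to_multilinestring coord_list max_id → Spec_convert_prediction_to_multilinestring coord_list max_id (convert_prediction_to_multilinestring coord_list max_id)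

-- ===== LEMMAS AND PROOFS =====

-- A's step without the (already filtered-out) skip branch
def pvStep' (delim : Int × Int) (st : List (List (Int × Int)) × List (Int × Int)) (coord : Int × Int) :
    List (List (Int × Int)) × List (Int × Int) :=
  if coord = delim then ((if st.2.length > 1 then st.1 ++ [st.2] else st.1), [])
  else (st.1, st.2 ++ [coord])

-- folding A's step over the list = folding the skip-free step over the filtered list
theorem foldA_filter (max_id : Int) (xs : List (Int × Int)) (st : List (List (Int × Int)) × List (Int × Int)) :
    xs.foldl (pvStepA max_id) st =
      (xs.filter (fun c => ¬(c = (max_id+1, max_id+1) ∨ c = (max_id+2, max_id+2) ∨ c = (max_id+3, max_id+3)))).foldl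
        (pvStep' (max_id+4, max_id+4)) st := by
  induction xs generalizing st with
  | nil => rfl
  | cons c xs ih =>
    by_cases h : c = (max_id+1, max_id+1) ∨ c = (max_id+2, max_id+2) ∨ c = (max_id+3, max_id+3)
    · have hp : (decide ¬(c = (max_id+1, max_id+1) ∨ c = (max_id+2, max_id+2) ∨ c = (max_id+3, max_id+3))) = false :=
        decide_eq_false (not_not_intro h)
      rw [List.foldl_cons, List.filter_cons, hp]
      simp only [Bool.false_eq_true, if_false]
      rw [show pvStepA max_id st c = st from by simp [pvStepA, h]]
      exact ih st
    · have hp : (decide ¬(c = (max_id+1, max_id+1) ∨ c = (max_id+2, max_id+2) ∨ c = (max_id+3, max_id+3))) = true :=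
        decide_eq_true h
      rw [List.foldl_cons, List.filter_cons, hp]
      simp only [if_true]
      rw [List.foldl_cons, ih,
        show pvStepA max_id st c = pvStep' (max_id+4, max_id+4) st c from by
          simp [pvStepA, pvStep', h]]

theorem tw_append {delim : Int × Int} {xs : List (Int × Int)} (h : ∀ c ∈ xs, c ≠ delim) (l : List (Int × Int)) :
    (xs ++ delim :: l).takeWhile (fun c => c ≠ delim) = xs := by
  induction xs with
  | nil => simp [List.takeWhile_cons_of_neg]
  | cons y ys ih =>
    have hys := ih (fun c hc => h c (List.mem_cons_of_mem _ hc))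
    rw [List.cons_append, List.takeWhile_cons_of_pos (by simp [h y (List.mem_cons_self)]), hys]

theorem dw_append {delim : Int × Int} {xs : List (Int × Int)} (h : ∀ c ∈ xs, c ≠ delim) (l : List (Int × Int)) :
    (xs ++ delim :: l).dropWhile (fun c => c ≠ delim) = delim :: l := by
  induction xs with
  | nil => simp [List.dropWhile_cons_of_neg]
  | cons y ys ih =>
    have hys := ih (fun c hc => h c (List.mem_cons_of_mem _ hc))
    rw [List.cons_append, List.dropWhile_cons_of_pos (by simp [h y (List.mem_cons_self)]), hys]

theorem tw_self {delim : Int × Int} {xs : List (Int × Int)} (h : ∀ c ∈ xs, c ≠ delim) :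
    xs.takeWhile (fun c => c ≠ delim) = xs := by
  induction xs with
  | nil => simp
  | cons y ys ih =>
    have hys := ih (fun c hc => h c (List.mem_cons_of_mem _ hc))
    rw [List.takeWhile_cons_of_pos (by simp [h y (List.mem_cons_self)]), hys]

theorem dw_self {delim : Int × Int} {xs : List (Int × Int)} (h : ∀ c ∈ xs, c ≠ delim) :
    xs.dropWhile (fun c => c ≠ delim) = [] := by
  induction xs with
  | nil => simp
  | cons y ys ih =>
    have hys := ih (fun c hc => h c (List.mem_cons_of_mem _ hc))
    rw [List.dropWhile_cons_of_pos (by simp [h y (List.mem_cons_self)]), hys]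

theorem splitRuns_free {delim : Int × Int} {seg : List (Int × Int)} (h : ∀ c ∈ seg, c ≠ delim) :
    pvSplitRuns delim seg = if seg.length > 1 then [seg] else [] := by
  cases seg with
  | nil => simp [pvSplitRuns]
  | cons x xs =>
    have hx : x ≠ delim := h x (by simp)
    have hxs : ∀ c ∈ xs, c ≠ delim := fun c hc => h c (by simp [hc])
    rw [pvSplitRuns, if_neg hx]
    simp only [tw_self hxs, dw_self hxs, pvSplitRuns]
    simp

theorem splitRuns_flush {delim : Int × Int} {seg : List (Int × Int)} (h : ∀ c ∈ seg, c ≠ delim) (l : List (Int × Int)) :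
    pvSplitRuns delim (seg ++ delim :: l) =
      (if seg.length > 1 then [seg] else []) ++ pvSplitRuns delim l := by
  cases seg with
  | nil => simp [pvSplitRuns]
  | cons x xs =>
    have hx : x ≠ delim := h x (by simp)
    have hxs : ∀ c ∈ xs, c ≠ delim := fun c hc => h c (by simp [hc])
    rw [List.cons_append, pvSplitRuns, if_neg hx]
    simp only [tw_append hxs l, dw_append hxs l]
    rw [pvSplitRuns, if_pos rfl]

-- loop invariant: flushing after the remaining fold = emitted lines plus B's split of segment ++ rest
theorem fold_inv (delim : Int × Int) (l : List (Int × Int)) :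
    ∀ (seg : List (Int × Int)) (lines : List (List (Int × Int))), (∀ c ∈ seg, c ≠ delim) →
      (if (l.foldl (pvStep' delim) (lines, seg)).2.length > 1
       then (l.foldl (pvStep' delim) (lines, seg)).1 ++ [(l.foldl (pvStep' delim) (lines, seg)).2]
       else (l.foldl (pvStep' delim) (lines, seg)).1) =
        lines ++ pvSplitRuns delim (seg ++ l) := by
  induction l with
  | nil =>
    intro seg lines h
    simp only [List.foldl_nil, List.append_nil, splitRuns_free h]
    split <;> simp
  | cons c l ih =>
    intro seg lines h
    by_cases hc : c = delim
    · simp only [List.foldl_cons, pvStep', if_pos hc]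
      rw [ih [] _ (by simp), hc, splitRuns_flush h]
      simp only [List.nil_append]
      split <;> simp
    · simp only [List.foldl_cons, pvStep', if_neg hc]
      rw [ih (seg ++ [c]) lines (by intro d hd
                                    rcases List.mem_append.mp hd with h1 | h1
                                    · exact h d h1
                                    · simp at h1; subst h1; exact hc)]
      simp

-- ===== VERDICT (by name: the statement is the Claim_ definition above) =====
theorem convert_prediction_to_multilinestring_spec : Claim_equal_convert_prediction_to_multilinestring := by
  intro coord_list max_id _
  unfold Spec_convert_prediction_to_multilinestring convert_prediction_to_multilinestring
    convert_prediction_to_multilinestring_alt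
  rw [foldA_filter]
  simpa using fold_inv (max_id+4, max_id+4) _ [] [] (by simp)
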